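-- pv_equiv track=rewrite | github.com/wwPDB/py-wwpdb_apps_seqmodule | wwpdb/apps/seqmodule/align/AlignmentTools.py | _isCompatible
-- ===== SOURCE A (Python) =====
-- def _isCompatible(comment, newResName):
--     """Verify the coordinate residue side-chain pattern defined in comment is compatible with new residue name"""
--     compatibilityMap = {
--         "ala-gly-like": [
--             "ALA",
--             "ARG",
--             "ASN",
--             "ASP",
--             "CYS",
--             "GLN",
--             "GLU",
--             "GLY",
--             "HIS",
--             "ILE",
--             "LEU",
--             "LYS",
--             "MET",
--             "MSE",
--             "PHE",
--             "PRO",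
--             "PYL",
--             "SEC",
--             "SER",
--             "THR",
--             "TRP",
--             "TYR",
--             "UNK",
--             "VAL",
--         ],
--         "c-gamma-like": ["ARG", "ASN", "ASP", "GLN", "GLU", "HIS", "ILE", "LEU", "LYS", "MET", "MSE", "PHE", "PYL", "TRP", "THR", "TYR", "VAL"],
--         "c-delta-like": ["ARG", "GLN", "GLU", "HIS", "ILE", "LYS", "PHE", "PYL", "TRP", "TYR"],
--         "ile-val-like": ["ILE", "VAL"],
--         "ser-thr-like": ["SER", "THR"],
--         "phe-tyr-like": ["PHE", "TYR"],
--         "lys-pyl-like": ["LYS", "PYL"],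
--     }
--
--     #
--     if not comment:
--         return False
--     #
--     for patternType, allowList in compatibilityMap.items():
--         if (comment.find(patternType) != -1) and (newResName in allowList):
--             return True
--         #
--     #
--     return False
-- ===== SOURCE B (Python) =====
-- # Precomputed reverse index: residue name -> comment keywords whose allow-list contains it
-- # (derived once, by hand, from the 7-group compatibility table of the original).
-- _RESIDUE_KEYWORDS = {
--     "ALA": ("ala-gly-like",),
--     "ARG": ("ala-gly-like", "c-gamma-like", "c-delta-like"),
--     "ASN": ("ala-gly-like", "c-gamma-like"),
--     "ASP": ("ala-gly-like", "c-gamma-like"),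
--     "CYS": ("ala-gly-like",),
--     "GLN": ("ala-gly-like", "c-gamma-like", "c-delta-like"),
--     "GLU": ("ala-gly-like", "c-gamma-like", "c-delta-like"),
--     "GLY": ("ala-gly-like",),
--     "HIS": ("ala-gly-like", "c-gamma-like", "c-delta-like"),
--     "ILE": ("ala-gly-like", "c-gamma-like", "c-delta-like", "ile-val-like"),
--     "LEU": ("ala-gly-like", "c-gamma-like"),
--     "LYS": ("ala-gly-like", "c-gamma-like", "c-delta-like", "lys-pyl-like"),
--     "MET": ("ala-gly-like", "c-gamma-like"),
--     "MSE": ("ala-gly-like", "c-gamma-like"),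
--     "PHE": ("ala-gly-like", "c-gamma-like", "c-delta-like", "phe-tyr-like"),
--     "PRO": ("ala-gly-like",),
--     "PYL": ("ala-gly-like", "c-gamma-like", "c-delta-like", "lys-pyl-like"),
--     "SEC": ("ala-gly-like",),
--     "SER": ("ala-gly-like", "ser-thr-like"),
--     "THR": ("ala-gly-like", "c-gamma-like", "ser-thr-like"),
--     "TRP": ("ala-gly-like", "c-gamma-like", "c-delta-like"),
--     "TYR": ("ala-gly-like", "c-gamma-like", "c-delta-like", "phe-tyr-like"),
--     "UNK": ("ala-gly-like",),
--     "VAL": ("ala-gly-like", "c-gamma-like", "ile-val-like"),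
-- }
--
--
-- def _isCompatible(comment, newResName):
--     """Verify the coordinate residue side-chain pattern defined in comment is compatible with new residue name"""
--     if not comment:
--         return False
--     return any(keyword in comment for keyword in _RESIDUE_KEYWORDS.get(newResName, ()))
-- ===== Notes on version B (the rewrite author's own statement) =====
-- stated objective: alternative
-- what changed: B replaces A's runtime scan over all 7 pattern groups (substring test plus allow-list membership for each) with a precomputed constant reverse index residue-name -> keywords; at call time it does one dict lookup of newResName and an any-substring pass over just that residue's keywords.
import Mathlib
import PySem

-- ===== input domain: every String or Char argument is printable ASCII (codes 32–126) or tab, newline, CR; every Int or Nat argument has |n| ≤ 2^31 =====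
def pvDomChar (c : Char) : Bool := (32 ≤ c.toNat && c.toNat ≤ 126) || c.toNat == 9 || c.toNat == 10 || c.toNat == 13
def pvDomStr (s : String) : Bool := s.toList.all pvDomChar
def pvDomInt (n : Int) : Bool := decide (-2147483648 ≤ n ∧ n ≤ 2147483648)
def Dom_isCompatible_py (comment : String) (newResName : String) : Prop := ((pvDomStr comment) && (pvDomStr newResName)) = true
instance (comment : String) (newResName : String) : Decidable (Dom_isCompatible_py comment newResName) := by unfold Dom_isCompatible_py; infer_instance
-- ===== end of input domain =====

-- B replaces A's runtime scan over all 7 comment-pattern groups by a precomputed constant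
-- reverse index residue-name → keywords, a single dict lookup of newResName and an any-substring
-- pass over just that residue's keywords (objective: alternative).

-- ===== PORT A =====
-- A's dict literal of pattern groups (insertion order as written in the Python source)
def compatTableA : PySem.Dict String (List String) := PySem.Dict.mk [
  ("ala-gly-like", ["ALA","ARG","ASN","ASP","CYS","GLN","GLU","GLY","HIS","ILE","LEU","LYS","MET","MSE","PHE","PRO","PYL","SEC","SER","THR","TRP","TYR","UNK","VAL"]),
  ("c-gamma-like", ["ARG","ASN","ASP","GLN","GLU","HIS","ILE","LEU","LYS","MET","MSE","PHE","PYL","TRP","THR","TYR","VAL"]),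
  ("c-delta-like", ["ARG","GLN","GLU","HIS","ILE","LYS","PHE","PYL","TRP","TYR"]),
  ("ile-val-like", ["ILE","VAL"]),
  ("ser-thr-like", ["SER","THR"]),
  ("phe-tyr-like", ["PHE","TYR"]),
  ("lys-pyl-like", ["LYS","PYL"])]

-- A's 'for patternType, allowList in compatibilityMap.items(): if … return True' loop, early return and all
def aLoop (comment : String) (newResName : String) : List (String × List String) → Bool
  | [] => false
  | (patternType, allowList) :: rest =>
      if (PySem.Str.find comment patternType != -1) && allowList.contains newResName then true
      else aLoop comment newResName rest

def isCompatible_py (comment : String) (newResName : String) : Bool :=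
  if comment == "" then false          -- 'if not comment: return False'
  else aLoop comment newResName compatTableA.items

-- ===== PORT B =====
-- B's precomputed constant _RESIDUE_KEYWORDS (a literal in Source B, a literal here)
def residueKeywords : PySem.Dict String (List String) := PySem.Dict.mk [
  ("ALA", ["ala-gly-like"]),
  ("ARG", ["ala-gly-like","c-gamma-like","c-delta-like"]),
  ("ASN", ["ala-gly-like","c-gamma-like"]),
  ("ASP", ["ala-gly-like","c-gamma-like"]),
  ("CYS", ["ala-gly-like"]),
  ("GLN", ["ala-gly-like","c-gamma-like","c-delta-like"]),
  ("GLU", ["ala-gly-like","c-gamma-like","c-delta-like"]),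
  ("GLY", ["ala-gly-like"]),
  ("HIS", ["ala-gly-like","c-gamma-like","c-delta-like"]),
  ("ILE", ["ala-gly-like","c-gamma-like","c-delta-like","ile-val-like"]),
  ("LEU", ["ala-gly-like","c-gamma-like"]),
  ("LYS", ["ala-gly-like","c-gamma-like","c-delta-like","lys-pyl-like"]),
  ("MET", ["ala-gly-like","c-gamma-like"]),
  ("MSE", ["ala-gly-like","c-gamma-like"]),
  ("PHE", ["ala-gly-like","c-gamma-like","c-delta-like","phe-tyr-like"]),
  ("PRO", ["ala-gly-like"]),
  ("PYL", ["ala-gly-like","c-gamma-like","c-delta-like","lys-pyl-like"]),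
  ("SEC", ["ala-gly-like"]),
  ("SER", ["ala-gly-like","ser-thr-like"]),
  ("THR", ["ala-gly-like","c-gamma-like","ser-thr-like"]),
  ("TRP", ["ala-gly-like","c-gamma-like","c-delta-like"]),
  ("TYR", ["ala-gly-like","c-gamma-like","c-delta-like","phe-tyr-like"]),
  ("UNK", ["ala-gly-like"]),
  ("VAL", ["ala-gly-like","c-gamma-like","ile-val-like"])]

def isCompatible_py_alt (comment : String) (newResName : String) : Bool :=
  if comment == "" then false          -- 'if not comment: return False'
  else (residueKeywords.getD newResName []).any (fun kw => PySem.Str.isIn kw comment)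

-- ===== PRECONDITION & SPEC =====
def Spec_isCompatible_py (comment : String) (newResName : String) (out : Bool) : Prop := out = isCompatible_py_alt comment newResName
instance (comment : String) (newResName : String) (out : Bool) : Decidable (Spec_isCompatible_py comment newResName out) := by unfold Spec_isCompatible_py; infer_instance

-- ===== CLAIM =====
def Claim_equal_isCompatible_py : Prop := ∀ (comment : String) (newResName : String), Dom_isCompatible_py comment newResName → Spec_isCompatible_py comment newResName (isCompatible_py comment newResName)

-- ===== LEMMAS AND PROOFS =====

-- 's.find(sub) != -1' and 'sub in s' are the same test (stated on the Chars side, in simp-normal form)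
lemma find_decide_eq_isIn (sub s : List Char) :
    (!decide (PySem.Chars.find s sub = -1)) = PySem.Chars.isIn sub s := by
  rw [Bool.eq_iff_iff]
  simp [PySem.Chars.find_ne_neg_one_iff, PySem.Chars.isIn_iff_infix]

lemma main_eq (comment newResName : String) :
    isCompatible_py comment newResName = isCompatible_py_alt comment newResName := by
  unfold isCompatible_py isCompatible_py_alt
  by_cases hc : comment = ""
  · simp [hc]
  · simp only [beq_iff_eq, if_neg hc]
    by_cases h0 : newResName = "ALA"
    · subst h0; simp [aLoop, compatTableA, residueKeywords, find_decide_eq_isIn, PySem.Dict.get?_mk_cons, PySem.Dict.getD_eq_get?_getD]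
    by_cases h1 : newResName = "ARG"
    · subst h1; simp [aLoop, compatTableA, residueKeywords, find_decide_eq_isIn, PySem.Dict.get?_mk_cons, PySem.Dict.getD_eq_get?_getD]
    by_cases h2 : newResName = "ASN"
    · subst h2; simp [aLoop, compatTableA, residueKeywords, find_decide_eq_isIn, PySem.Dict.get?_mk_cons, PySem.Dict.getD_eq_get?_getD]
    by_cases h3 : newResName = "ASP"
    · subst h3; simp [aLoop, compatTableA, residueKeywords, find_decide_eq_isIn, PySem.Dict.get?_mk_cons, PySem.Dict.getD_eq_get?_getD]
    by_cases h4 : newResName = "CYS"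
    · subst h4; simp [aLoop, compatTableA, residueKeywords, find_decide_eq_isIn, PySem.Dict.get?_mk_cons, PySem.Dict.getD_eq_get?_getD]
    by_cases h5 : newResName = "GLN"
    · subst h5; simp [aLoop, compatTableA, residueKeywords, find_decide_eq_isIn, PySem.Dict.get?_mk_cons, PySem.Dict.getD_eq_get?_getD]
    by_cases h6 : newResName = "GLU"
    · subst h6; simp [aLoop, compatTableA, residueKeywords, find_decide_eq_isIn, PySem.Dict.get?_mk_cons, PySem.Dict.getD_eq_get?_getD]
    by_cases h7 : newResName = "GLY"
    · subst h7; simp [aLoop, compatTableA, residueKeywords, find_decide_eq_isIn, PySem.Dict.get?_mk_cons, PySem.Dict.getD_eq_get?_getD]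
    by_cases h8 : newResName = "HIS"
    · subst h8; simp [aLoop, compatTableA, residueKeywords, find_decide_eq_isIn, PySem.Dict.get?_mk_cons, PySem.Dict.getD_eq_get?_getD]
    by_cases h9 : newResName = "ILE"
    · subst h9; simp [aLoop, compatTableA, residueKeywords, find_decide_eq_isIn, PySem.Dict.get?_mk_cons, PySem.Dict.getD_eq_get?_getD]
    by_cases h10 : newResName = "LEU"
    · subst h10; simp [aLoop, compatTableA, residueKeywords, find_decide_eq_isIn, PySem.Dict.get?_mk_cons, PySem.Dict.getD_eq_get?_getD]
    by_cases h11 : newResName = "LYS"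
    · subst h11; simp [aLoop, compatTableA, residueKeywords, find_decide_eq_isIn, PySem.Dict.get?_mk_cons, PySem.Dict.getD_eq_get?_getD]
    by_cases h12 : newResName = "MET"
    · subst h12; simp [aLoop, compatTableA, residueKeywords, find_decide_eq_isIn, PySem.Dict.get?_mk_cons, PySem.Dict.getD_eq_get?_getD]
    by_cases h13 : newResName = "MSE"
    · subst h13; simp [aLoop, compatTableA, residueKeywords, find_decide_eq_isIn, PySem.Dict.get?_mk_cons, PySem.Dict.getD_eq_get?_getD]
    by_cases h14 : newResName = "PHE"
    · subst h14; simp [aLoop, compatTableA, residueKeywords, find_decide_eq_isIn, PySem.Dict.get?_mk_cons, PySem.Dict.getD_eq_get?_getD]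
    by_cases h15 : newResName = "PRO"
    · subst h15; simp [aLoop, compatTableA, residueKeywords, find_decide_eq_isIn, PySem.Dict.get?_mk_cons, PySem.Dict.getD_eq_get?_getD]
    by_cases h16 : newResName = "PYL"
    · subst h16; simp [aLoop, compatTableA, residueKeywords, find_decide_eq_isIn, PySem.Dict.get?_mk_cons, PySem.Dict.getD_eq_get?_getD]
    by_cases h17 : newResName = "SEC"
    · subst h17; simp [aLoop, compatTableA, residueKeywords, find_decide_eq_isIn, PySem.Dict.get?_mk_cons, PySem.Dict.getD_eq_get?_getD]
    by_cases h18 : newResName = "SER"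
    · subst h18; simp [aLoop, compatTableA, residueKeywords, find_decide_eq_isIn, PySem.Dict.get?_mk_cons, PySem.Dict.getD_eq_get?_getD]
    by_cases h19 : newResName = "THR"
    · subst h19; simp [aLoop, compatTableA, residueKeywords, find_decide_eq_isIn, PySem.Dict.get?_mk_cons, PySem.Dict.getD_eq_get?_getD]
    by_cases h20 : newResName = "TRP"
    · subst h20; simp [aLoop, compatTableA, residueKeywords, find_decide_eq_isIn, PySem.Dict.get?_mk_cons, PySem.Dict.getD_eq_get?_getD]
    by_cases h21 : newResName = "TYR"
    · subst h21; simp [aLoop, compatTableA, residueKeywords, find_decide_eq_isIn, PySem.Dict.get?_mk_cons, PySem.Dict.getD_eq_get?_getD]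
    by_cases h22 : newResName = "UNK"
    · subst h22; simp [aLoop, compatTableA, residueKeywords, find_decide_eq_isIn, PySem.Dict.get?_mk_cons, PySem.Dict.getD_eq_get?_getD]
    by_cases h23 : newResName = "VAL"
    · subst h23; simp [aLoop, compatTableA, residueKeywords, find_decide_eq_isIn, PySem.Dict.get?_mk_cons, PySem.Dict.getD_eq_get?_getD]
    simp [aLoop, compatTableA, residueKeywords, PySem.Dict.getD_eq_get?_getD, PySem.Dict.get?, beq_iff_eq, h0, Ne.symm h0, h1, Ne.symm h1, h2, Ne.symm h2, h3, Ne.symm h3, h4, Ne.symm h4, h5, Ne.symm h5, h6, Ne.symm h6, h7, Ne.symm h7, h8, Ne.symm h8, h9, Ne.symm h9, h10, Ne.symm h10, h11, Ne.symm h11, h12, Ne.symm h12, h13, Ne.symm h13, h14, Ne.symm h14, h15, Ne.symm h15, h16, Ne.symm h16, h17, Ne.symm h17, h18, Ne.symm h18, h19, Ne.symm h19, h20, Ne.symm h20, h21, Ne.symm h21, h22, Ne.symm h22, h23, Ne.symm h23]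

-- ===== VERDICT =====
theorem isCompatible_py_spec : Claim_equal_isCompatible_py := by
  intro comment newResName _
  unfold Spec_isCompatible_py
  exact main_eq comment newResName
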